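-- pv_equiv track=rewrite | github.com/ugufru/coco | src/spacewarp/gen_sprite_report.py | sprite_to_svg
-- ===== SOURCE A (Python) =====
-- def seed_to_dims(seed):
--     """Decode width/height from appearance seed byte."""
--     w_bits = (seed >> 6) & 3
--     h_bits = (seed >> 4) & 3
--     width = {0: 5, 1: 7, 2: 7, 3: 9}[w_bits]
--     height = 5 if h_bits < 2 else 7
--     return width, height
--
-- def generate_sprite(seed):
--     """Generate pixel grid from seed, matching the 6809 PRNG exactly.
--     Returns (width, height, pixels) where pixels is a set of (col, row) tuples.
--     """
--     width, height = seed_to_dims(seed)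
--     half_width = (width + 1) // 2
--     state = seed & 0xFF
--     pixels = set()
--
--     for row in range(height):
--         # PRNG update: state = (state * 5 + 3) & 0xFF
--         state = (state * 5 + 3) & 0xFF
--
--         for col in range(half_width):
--             # Extract bit at position col
--             bit = (state >> col) & 1
--             if bit:
--                 pixels.add((col, row))
--                 # Mirror (unless center column)
--                 mirror_col = width - 1 - col
--                 if mirror_col != col:
--                     pixels.add((mirror_col, row))
--
--     # Center column guarantee
--     center_col = half_width - 1
--     center_row = height // 2
--     pixels.add((center_col, center_row))
--
--     return width, height, pixels
--
-- def sprite_to_svg(seed, color="#ffffff", pixel_size=2, bg=None):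
--     """Render a sprite as an inline SVG string.
--     pixel_size: size of each artifact pixel in SVG units.
--     """
--     width, height, pixels = generate_sprite(seed)
--     svg_w = width * pixel_size
--     svg_h = height * pixel_size
--
--     parts = [f'<svg xmlns="http://www.w3.org/2000/svg" '
--              f'width="{svg_w}" height="{svg_h}" '
--              f'viewBox="0 0 {svg_w} {svg_h}" '
--              f'style="image-rendering:pixelated">']
--
--     if bg:
--         parts.append(f'<rect width="{svg_w}" height="{svg_h}" fill="{bg}"/>')
--
--     for (cx, cy) in sorted(pixels):
--         x = cx * pixel_size
--         y = cy * pixel_size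
--         parts.append(f'<rect x="{x}" y="{y}" '
--                      f'width="{pixel_size}" height="{pixel_size}" '
--                      f'fill="{color}"/>')
--
--     parts.append('</svg>')
--     return ''.join(parts)
-- ===== SOURCE B (Python) =====
-- def sprite_to_svg(seed, color="#ffffff", pixel_size=2, bg=None):
--     """Render a sprite as an inline SVG string.
--     pixel_size: size of each artifact pixel in SVG units.
--     """
--     width = (5, 7, 7, 9)[(seed >> 6) & 3]
--     height = 5 if ((seed >> 4) & 3) < 2 else 7
--     half_width = (width + 1) // 2
--     states = []
--     state = seed & 0xFF
--     for _ in range(height):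
--         state = (state * 5 + 3) & 0xFF
--         states.append(state)
--     svg_w = width * pixel_size
--     svg_h = height * pixel_size
--     out = (f'<svg xmlns="http://www.w3.org/2000/svg" '
--            f'width="{svg_w}" height="{svg_h}" '
--            f'viewBox="0 0 {svg_w} {svg_h}" '
--            f'style="image-rendering:pixelated">')
--     if bg:
--         out += f'<rect width="{svg_w}" height="{svg_h}" fill="{bg}"/>'
--     for cx in range(width):
--         src = cx if cx < half_width else width - 1 - cx
--         for cy in range(height):
--             if (states[cy] >> src) & 1 or (cx == half_width - 1 and cy == height // 2):
--                 out += (f'<rect x="{cx * pixel_size}" y="{cy * pixel_size}" '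
--                         f'width="{pixel_size}" height="{pixel_size}" '
--                         f'fill="{color}"/>')
--     return out + '</svg>'
-- ===== Notes on version B (the rewrite author's own statement) =====
-- stated objective: alternative
-- what changed: B replaces A's build-a-set-with-mirroring-then-sort pipeline by a direct column-major scan: it precomputes the per-row PRNG states once, derives each column's source bit position from the mirror symmetry, and emits the rects in (col,row) order straight away, so the pixel set and the sort disappear.
import Mathlib
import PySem

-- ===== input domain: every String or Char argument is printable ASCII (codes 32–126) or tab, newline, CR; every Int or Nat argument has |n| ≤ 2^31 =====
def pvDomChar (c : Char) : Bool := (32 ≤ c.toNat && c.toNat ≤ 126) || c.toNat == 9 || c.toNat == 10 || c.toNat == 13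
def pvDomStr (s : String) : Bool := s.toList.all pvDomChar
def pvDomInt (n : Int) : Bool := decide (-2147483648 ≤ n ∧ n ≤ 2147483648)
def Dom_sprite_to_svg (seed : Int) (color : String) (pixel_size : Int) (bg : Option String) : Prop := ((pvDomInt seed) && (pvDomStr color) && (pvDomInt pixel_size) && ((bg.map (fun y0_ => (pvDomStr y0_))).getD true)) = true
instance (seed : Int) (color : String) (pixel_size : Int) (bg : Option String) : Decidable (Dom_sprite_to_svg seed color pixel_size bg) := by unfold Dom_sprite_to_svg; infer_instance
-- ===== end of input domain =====

-- B replaces A's build-a-pixel-set-with-mirroring-then-sort pipeline by a direct column-major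
-- scan over precomputed per-row PRNG states, emitting the rects already in (col,row) order;
-- objective: alternative (no set, no sort; same exact output).

-- ===== PORT A =====
def seed_to_dims (seed : Int) : Int × Int :=
  let w_bits := PySem.Int.band (seed >>> (6:Nat)) 3
  let h_bits := PySem.Int.band (seed >>> (4:Nat)) 3
  -- {0:5,1:7,2:7,3:9}[w_bits]: w_bits = (seed >> 6) & 3 ∈ {0,1,2,3}, so the dict lookup always
  -- succeeds and the `.getD 0` (KeyError) branch is unreachable
  let width := ((PySem.Dict.ofList [((0:Int),(5:Int)),(1,7),(2,7),(3,9)]).get? w_bits).getD 0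
  let height : Int := if h_bits < 2 then 5 else 7
  (width, height)

def generate_sprite (seed : Int) : Int × Int × PySem.Set (Int × Int) :=
  let wh := seed_to_dims seed
  let width := wh.1
  let height := wh.2
  let half_width := PySem.Int.floordiv (width + 1) 2
  let state0 := PySem.Int.band seed 255
  let sp := (PySem.List.pyRange 0 height 1).foldl
    (fun (sp : Int × PySem.Set (Int × Int)) row =>
      let state := PySem.Int.band (sp.1 * 5 + 3) 255
      let pixels := (PySem.List.pyRange 0 half_width 1).foldl
        (fun pixels col =>
          -- col ∈ range(half_width) is nonnegative, so `col.toNat` is exact for Python's `state >> col`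
          let bit := PySem.Int.band (state >>> col.toNat) 1
          if bit ≠ 0 then
            let pixels := PySem.Set.add pixels (col, row)
            let mirror_col := width - 1 - col
            if mirror_col ≠ col then PySem.Set.add pixels (mirror_col, row) else pixels
          else pixels)
        sp.2
      (state, pixels))
    (state0, PySem.Set.empty)
  let center_col := half_width - 1
  let center_row := PySem.Int.floordiv height 2
  (width, height, PySem.Set.add sp.2 (center_col, center_row))

-- Python's `sorted(pixels)` on distinct (col, row) int pairs = sorted2 with the two components as keys
def sprite_to_svg (seed : Int) (color : String) (pixel_size : Int) (bg : Option String) : String :=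
  let whp := generate_sprite seed
  let width := whp.1
  let height := whp.2.1
  let pixels := whp.2.2
  let svg_w := width * pixel_size
  let svg_h := height * pixel_size
  let parts : List String :=
    ["<svg xmlns=\"http://www.w3.org/2000/svg\" width=\"" ++ PySem.Int.toStr svg_w ++
     "\" height=\"" ++ PySem.Int.toStr svg_h ++ "\" viewBox=\"0 0 " ++ PySem.Int.toStr svg_w ++
     " " ++ PySem.Int.toStr svg_h ++ "\" style=\"image-rendering:pixelated\">"]
  -- `if bg:` — true iff bg is a non-empty string
  let parts := match bg with
    | some b => if b ≠ "" then parts ++ ["<rect width=\"" ++ PySem.Int.toStr svg_w ++ "\" height=\"" ++ PySem.Int.toStr svg_h ++ "\" fill=\"" ++ b ++ "\"/>"] else parts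
    | none => parts
  let parts := (PySem.List.sorted2 pixels (fun p => p.1) (fun p => p.2)).foldl
    (fun parts p =>
      let x := p.1 * pixel_size
      let y := p.2 * pixel_size
      parts ++ ["<rect x=\"" ++ PySem.Int.toStr x ++ "\" y=\"" ++ PySem.Int.toStr y ++
                "\" width=\"" ++ PySem.Int.toStr pixel_size ++ "\" height=\"" ++ PySem.Int.toStr pixel_size ++
                "\" fill=\"" ++ color ++ "\"/>"]) parts
  let parts := parts ++ ["</svg>"]
  PySem.Str.join "" parts

-- ===== PORT B =====
def sprite_to_svg_alt (seed : Int) (color : String) (pixel_size : Int) (bg : Option String) : String :=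
  -- (5,7,7,9)[w_bits]: w_bits ∈ {0,1,2,3}, so the tuple indexing always succeeds (`.getD 0` unreachable)
  let width := (PySem.List.pyGet? [(5:Int),7,7,9] (PySem.Int.band (seed >>> (6:Nat)) 3)).getD 0
  let height : Int := if PySem.Int.band (seed >>> (4:Nat)) 3 < 2 then 5 else 7
  let half_width := PySem.Int.floordiv (width + 1) 2
  let st := (PySem.List.pyRange 0 height 1).foldl
    (fun (st : Int × List Int) _ =>
      let state := PySem.Int.band (st.1 * 5 + 3) 255
      (state, st.2 ++ [state]))
    (PySem.Int.band seed 255, [])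
  let states := st.2
  let svg_w := width * pixel_size
  let svg_h := height * pixel_size
  let out :=
    "<svg xmlns=\"http://www.w3.org/2000/svg\" width=\"" ++ PySem.Int.toStr svg_w ++
    "\" height=\"" ++ PySem.Int.toStr svg_h ++ "\" viewBox=\"0 0 " ++ PySem.Int.toStr svg_w ++
    " " ++ PySem.Int.toStr svg_h ++ "\" style=\"image-rendering:pixelated\">"
  let out := match bg with
    | some b => if b ≠ "" then out ++ ("<rect width=\"" ++ PySem.Int.toStr svg_w ++ "\" height=\"" ++ PySem.Int.toStr svg_h ++ "\" fill=\"" ++ b ++ "\"/>") else out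
    | none => out
  let out := (PySem.List.pyRange 0 width 1).foldl
    (fun out cx =>
      let src := if cx < half_width then cx else width - 1 - cx
      -- cy ∈ range(height) = range of `states`, so `states[cy]` never raises (pyGetD exact);
      -- src ≥ 0, so `src.toNat` is exact for Python's `>> src`
      (PySem.List.pyRange 0 height 1).foldl
        (fun out cy =>
          if PySem.Int.band ((PySem.List.pyGetD states cy 0) >>> src.toNat) 1 ≠ 0 ∨
             (cx = half_width - 1 ∧ cy = PySem.Int.floordiv height 2) then
            out ++ ("<rect x=\"" ++ PySem.Int.toStr (cx * pixel_size) ++ "\" y=\"" ++ PySem.Int.toStr (cy * pixel_size) ++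
                    "\" width=\"" ++ PySem.Int.toStr pixel_size ++ "\" height=\"" ++ PySem.Int.toStr pixel_size ++
                    "\" fill=\"" ++ color ++ "\"/>")
          else out)
        out)
    out
  out ++ "</svg>"

-- ===== PRECONDITION & SPEC =====
def Spec_sprite_to_svg (seed : Int) (color : String) (pixel_size : Int) (bg : Option String) (out : String) : Prop := out = sprite_to_svg_alt seed color pixel_size bg
instance (seed : Int) (color : String) (pixel_size : Int) (bg : Option String) (out : String) : Decidable (Spec_sprite_to_svg seed color pixel_size bg out) := by unfold Spec_sprite_to_svg; infer_instance

-- ===== CLAIM (what is proved, stated in full; the proofs are below) =====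
def Claim_equal_sprite_to_svg : Prop := ∀ (seed : Int) (color : String) (pixel_size : Int) (bg : Option String), Dom_sprite_to_svg seed color pixel_size bg → Spec_sprite_to_svg seed color pixel_size bg (sprite_to_svg seed color pixel_size bg)

-- ===== LEMMAS AND PROOFS =====


-- the pixel list A sorts, and the pixel list B scans, as standalone functions of the seed
def pixA (s : Int) : List (Int × Int) :=
  PySem.List.sorted2 (generate_sprite s).2.2 (fun p => p.1) (fun p => p.2)

def pixB (s : Int) : List (Int × Int) :=
  let width := (PySem.List.pyGet? [(5:Int),7,7,9] (PySem.Int.band (s >>> (6:Nat)) 3)).getD 0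
  let height : Int := if PySem.Int.band (s >>> (4:Nat)) 3 < 2 then 5 else 7
  let half_width := PySem.Int.floordiv (width + 1) 2
  let states := ((PySem.List.pyRange 0 height 1).foldl
    (fun (st : Int × List Int) _ =>
      let state := PySem.Int.band (st.1 * 5 + 3) 255
      (state, st.2 ++ [state]))
    (PySem.Int.band s 255, [])).2
  (PySem.List.pyRange 0 width 1).flatMap (fun cx =>
    let src := if cx < half_width then cx else width - 1 - cx
    ((PySem.List.pyRange 0 height 1).filter (fun cy =>
      decide (PySem.Int.band ((PySem.List.pyGetD states cy 0) >>> src.toNat) 1 ≠ 0 ∨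
              (cx = half_width - 1 ∧ cy = PySem.Int.floordiv height 2)))).map (fun cy => (cx, cy)))


theorem band255_eq (a : Int) : PySem.Int.band a 255 = a % 256 := by
  unfold PySem.Int.band
  have h1 : ∀ n : Nat, n &&& (255:Int).toNat = n % 256 := by
    intro n
    have := Nat.and_two_pow_sub_one_eq_mod n 8
    norm_num at this ⊢
    exact this
  split_ifs with g1 g2 g3
  · rw [h1]; omega
  · omega
  · rw [Nat.and_comm, h1]; omega
  · omega

theorem band3_eq (a : Int) : PySem.Int.band a 3 = a % 4 := by
  unfold PySem.Int.band
  have h1 : ∀ n : Nat, n &&& (3:Int).toNat = n % 4 := by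
    intro n
    have := Nat.and_two_pow_sub_one_eq_mod n 2
    norm_num at this ⊢
    exact this
  split_ifs with g1 g2 g3
  · rw [h1]; omega
  · omega
  · rw [Nat.and_comm, h1]; omega
  · omega

theorem red6 (s : Int) : PySem.Int.band ((PySem.Int.band s 255) >>> (6:Nat)) 3 = PySem.Int.band (s >>> (6:Nat)) 3 := by
  rw [Int.shiftRight_eq_div_pow, Int.shiftRight_eq_div_pow, band3_eq, band3_eq, band255_eq]
  norm_num
  omega

theorem red4 (s : Int) : PySem.Int.band ((PySem.Int.band s 255) >>> (4:Nat)) 3 = PySem.Int.band (s >>> (4:Nat)) 3 := by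
  rw [Int.shiftRight_eq_div_pow, Int.shiftRight_eq_div_pow, band3_eq, band3_eq, band255_eq]
  norm_num
  omega

theorem red0 (s : Int) : PySem.Int.band (PySem.Int.band s 255) 255 = PySem.Int.band s 255 := by
  simp only [band255_eq]
  omega

theorem dims_mod (s : Int) : seed_to_dims s = seed_to_dims (PySem.Int.band s 255) := by
  unfold seed_to_dims
  rw [red6, red4]

theorem gs_mod (s : Int) : generate_sprite s = generate_sprite (PySem.Int.band s 255) := by
  unfold generate_sprite
  rw [red0, ← dims_mod]

theorem pixA_mod (s : Int) : pixA s = pixA (PySem.Int.band s 255) := by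
  unfold pixA
  rw [← gs_mod]

theorem pixB_mod (s : Int) : pixB s = pixB (PySem.Int.band s 255) := by
  unfold pixB
  rw [red6, red4, red0]

-- the 256 seed residues, checked by kernel evaluation in four chunks
set_option maxRecDepth 10000 in
theorem pixfin0 : ∀ r : Fin 64, pixA (r : Int) = pixB (r : Int) := by decide

set_option maxRecDepth 10000 in
theorem pixfin1 : ∀ r : Fin 64, pixA ((r : Int) + 64) = pixB ((r : Int) + 64) := by decide

set_option maxRecDepth 10000 in
theorem pixfin2 : ∀ r : Fin 64, pixA ((r : Int) + 128) = pixB ((r : Int) + 128) := by decide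

set_option maxRecDepth 10000 in
theorem pixfin3 : ∀ r : Fin 64, pixA ((r : Int) + 192) = pixB ((r : Int) + 192) := by decide

theorem pix_eq (s : Int) : pixA s = pixB s := by
  have hb := band255_eq s
  have h0 : 0 ≤ s % 256 := Int.emod_nonneg s (by norm_num)
  have h1 : s % 256 < 256 := Int.emod_lt_of_pos s (by norm_num)
  rw [pixA_mod s, pixB_mod s]
  rcases lt_or_ge (PySem.Int.band s 255) 64 with h | h
  · have hr : ((⟨(PySem.Int.band s 255).toNat, by omega⟩ : Fin 64) : Int) = PySem.Int.band s 255 := by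
      show ((PySem.Int.band s 255).toNat : Int) = PySem.Int.band s 255; omega
    rw [← hr]; exact pixfin0 _
  rcases lt_or_ge (PySem.Int.band s 255) 128 with h2 | h2
  · have hr : ((⟨(PySem.Int.band s 255 - 64).toNat, by omega⟩ : Fin 64) : Int) + 64 = PySem.Int.band s 255 := by
      show ((PySem.Int.band s 255 - 64).toNat : Int) + 64 = PySem.Int.band s 255; omega
    rw [← hr]; exact pixfin1 _
  rcases lt_or_ge (PySem.Int.band s 255) 192 with h3 | h3
  · have hr : ((⟨(PySem.Int.band s 255 - 128).toNat, by omega⟩ : Fin 64) : Int) + 128 = PySem.Int.band s 255 := by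
      show ((PySem.Int.band s 255 - 128).toNat : Int) + 128 = PySem.Int.band s 255; omega
    rw [← hr]; exact pixfin2 _
  · have hr : ((⟨(PySem.Int.band s 255 - 192).toNat, by omega⟩ : Fin 64) : Int) + 192 = PySem.Int.band s 255 := by
      show ((PySem.Int.band s 255 - 192).toNat : Int) + 192 = PySem.Int.band s 255; omega
    rw [← hr]; exact pixfin3 _

theorem hwidth (w : Int) (h0 : 0 ≤ w) (h1 : w < 4) :
    ((PySem.Dict.ofList [((0:Int),(5:Int)),(1,7),(2,7),(3,9)]).get? w).getD 0 =
    (PySem.List.pyGet? [(5:Int),7,7,9] w).getD 0 := by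
  interval_cases w <;> decide

theorem inter_nil_cons {a : Type} (x : List a) (l : List (List a)) :
    List.intercalate [] (x :: l) = x ++ List.intercalate [] l := by
  cases l <;> simp [List.intercalate, List.intersperse]

theorem sj_cons (x : String) (l : List String) :
    PySem.Str.join "" (x :: l) = x ++ PySem.Str.join "" l := by
  apply String.ext
  simp [PySem.Str.join, PySem.Chars.join, inter_nil_cons]

theorem sj_nil : PySem.Str.join "" ([] : List String) = "" := by
  apply String.ext
  simp [PySem.Str.join, PySem.Chars.join, List.intercalate]

theorem sj_append (l1 l2 : List String) :
    PySem.Str.join "" (l1 ++ l2) = PySem.Str.join "" l1 ++ PySem.Str.join "" l2 := by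
  induction l1 with
  | nil => simp [sj_nil]
  | cons a t ih => simp [sj_cons, ih, String.append_assoc]

theorem foldStr {a : Type} (l : List a) (f : a -> String) (init : String) :
    l.foldl (fun o x => o ++ f x) init = init ++ PySem.Str.join "" (l.map f) := by
  induction l generalizing init with
  | nil => simp [sj_nil]
  | cons x t ih => simp [List.foldl_cons, ih, sj_cons, String.append_assoc]

theorem foldStrIf {a : Type} (l : List a) (P : a -> Prop) [DecidablePred P] (f : a -> String) (init : String) :
    l.foldl (fun o x => if P x then o ++ f x else o) init
      = init ++ PySem.Str.join "" ((l.filter (fun x => decide (P x))).map f) := by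
  induction l generalizing init with
  | nil => simp [sj_nil]
  | cons x t ih =>
    by_cases h : P x
    · simp [List.foldl_cons, h, ih, sj_cons, String.append_assoc]
    · simp [List.foldl_cons, h, ih]

theorem sj_flat2 {a b : Type} (l : List a) (h : a -> List b) (g : a -> b -> String) :
    PySem.Str.join "" (l.map (fun x => PySem.Str.join "" ((h x).map (g x))))
      = PySem.Str.join "" ((l.flatMap (fun x => (h x).map (fun y => (x, y)))).map (fun p => g p.1 p.2)) := by
  induction l with
  | nil => simp [sj_nil]
  | cons x t ih => simp [sj_cons, sj_append, List.map_map, ih, Function.comp_def]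

theorem doubleFold {a b : Type} (lx : List a) (ly : List b) (C : a -> b -> Prop)
    [inst : ∀ x y, Decidable (C x y)] (g : a -> b -> String) (init : String) :
    lx.foldl (fun out cx => ly.foldl (fun out cy => if C cx cy then out ++ g cx cy else out) out) init
      = init ++ PySem.Str.join "" ((lx.flatMap (fun cx =>
          (ly.filter (fun cy => decide (C cx cy))).map (fun cy => (cx, cy)))).map (fun p => g p.1 p.2)) := by
  have hfun : (fun (out : String) cx => ly.foldl (fun out cy => if C cx cy then out ++ g cx cy else out) out)
      = fun out cx => out ++ PySem.Str.join "" ((ly.filter (fun cy => decide (C cx cy))).map (g cx)) := by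
    funext out cx
    exact foldStrIf ly (C cx) (g cx) out
  rw [hfun, foldStr, sj_flat2]

theorem main_eq (seed : Int) (color : String) (pixel_size : Int) (bg : Option String) :
    sprite_to_svg seed color pixel_size bg = sprite_to_svg_alt seed color pixel_size bg := by
  have hb3 := band3_eq (seed >>> (6:Nat))
  have hW : (generate_sprite seed).1 =
      (PySem.List.pyGet? [(5:Int),7,7,9] (PySem.Int.band (seed >>> (6:Nat)) 3)).getD 0 := by
    simp only [generate_sprite, seed_to_dims]
    exact hwidth _ (by omega) (by omega)
  have hH : (generate_sprite seed).2.1 = (if PySem.Int.band (seed >>> (4:Nat)) 3 < 2 then (5:Int) else 7) := by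
    simp only [generate_sprite, seed_to_dims]
  have hpix : PySem.List.sorted2 (generate_sprite seed).2.2 (fun p => p.1) (fun p => p.2) = pixB seed :=
    pix_eq seed
  simp only [sprite_to_svg, sprite_to_svg_alt]
  rw [hpix, hW, hH]
  simp only [pixB]
  cases bg with
  | none =>
    simp only [doubleFold, PySem.List.foldl_append_singleton_eq_map, sj_append, sj_cons, sj_nil,
      String.append_empty, String.append_assoc]
  | some b =>
    by_cases hb : b = "" <;>
      simp only [hb, doubleFold, PySem.List.foldl_append_singleton_eq_map, sj_append, sj_cons, sj_nil,
        if_true, if_false, ne_eq, not_true_eq_false, not_false_eq_true,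
        String.append_empty, String.append_assoc]

-- ===== VERDICT (by name: the statement is the Claim_ definition above) =====
theorem sprite_to_svg_spec : Claim_equal_sprite_to_svg := by
  intro seed color pixel_size bg _
  unfold Spec_sprite_to_svg
  exact main_eq seed color pixel_size bg
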